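-- pv_equiv track=rewrite | github.com/blackskyi/resume-customiser-2 | resume_updater.py | verify_keywords_added
-- ===== SOURCE A (Python) =====
-- def verify_keywords_added(original_text, updated_text, missing_skills):
--     """Verify which keywords were successfully added (no extra API calls)"""
--     original_lower = original_text.lower()
--     updated_lower = updated_text.lower()
--
--     added_keywords = []
--     already_present = []
--     not_added = []
--
--     for skill in missing_skills:
--         skill_lower = skill.lower()
--         was_present = skill_lower in original_lower
--         is_present = skill_lower in updated_lower
--
--         if is_present and not was_present:
--             added_keywords.append(skill)
--         elif is_present and was_present:
--             already_present.append(skill)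
--         else:
--             not_added.append(skill)
--
--     return {
--         'added': added_keywords,
--         'already_present': already_present,
--         'not_added': not_added
--     }
-- ===== SOURCE B (Python) =====
-- def verify_keywords_added(original_text, updated_text, missing_skills):
--     """Verify which keywords were successfully added (no extra API calls)"""
--     original_lower = original_text.lower()
--     updated_lower = updated_text.lower()
--
--     # Classify each DISTINCT lowered skill once (substring tests run once per
--     # distinct skill), then build each output list by filtering against the index.
--     category = {}
--     for skill in missing_skills:
--         sl = skill.lower()
--         if sl not in category:
--             category[sl] = ('not_added' if sl not in updated_lower
--                             else 'already_present' if sl in original_lower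
--                             else 'added')
--
--     return {label: [s for s in missing_skills if category[s.lower()] == label]
--             for label in ('added', 'already_present', 'not_added')}
-- ===== Notes on version B (the rewrite author's own statement) =====
-- stated objective: alternative
-- what changed: B builds a hash index mapping each distinct lowered skill to its category once (so the two substring scans of the texts run once per distinct lowered skill, not per occurrence), then produces each of the three output lists by filtering the skill list against that index, instead of A's single classifying loop appending to three accumulators.
import Mathlib
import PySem

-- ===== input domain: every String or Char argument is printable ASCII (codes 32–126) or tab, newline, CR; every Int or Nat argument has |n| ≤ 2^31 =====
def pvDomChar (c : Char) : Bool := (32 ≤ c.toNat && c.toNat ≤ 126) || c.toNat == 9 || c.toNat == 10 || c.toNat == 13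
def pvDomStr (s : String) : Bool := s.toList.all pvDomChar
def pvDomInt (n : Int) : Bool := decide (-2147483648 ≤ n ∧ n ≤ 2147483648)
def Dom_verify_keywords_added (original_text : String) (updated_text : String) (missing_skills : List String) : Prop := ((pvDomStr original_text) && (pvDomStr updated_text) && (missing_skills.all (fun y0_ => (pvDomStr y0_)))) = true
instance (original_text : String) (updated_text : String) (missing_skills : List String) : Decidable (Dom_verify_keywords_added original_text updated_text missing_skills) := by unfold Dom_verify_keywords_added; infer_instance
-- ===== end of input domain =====

-- B replaces A's single classifying loop with a category index built once per distinct
-- lowered skill plus three filter passes; same return value, no speed claim.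

-- ===== PORT A =====
def verify_keywords_added (original_text : String) (updated_text : String) (missing_skills : List String) : List (String × List String) :=
  let original_lower := PySem.Chars.lower original_text.toList
  let updated_lower := PySem.Chars.lower updated_text.toList
  let r := missing_skills.foldl
    (fun (acc : List String × List String × List String) skill =>
      let skill_lower := PySem.Chars.lower skill.toList
      let was_present := PySem.Chars.isIn skill_lower original_lower
      let is_present := PySem.Chars.isIn skill_lower updated_lower
      if is_present && !was_present then (acc.1 ++ [skill], acc.2.1, acc.2.2)
      else if is_present && was_present then (acc.1, acc.2.1 ++ [skill], acc.2.2)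
      else (acc.1, acc.2.1, acc.2.2 ++ [skill]))
    ([], [], [])
  [("added", r.1), ("already_present", r.2.1), ("not_added", r.2.2)]

-- ===== PORT B =====
-- the 'if sl not in category: category[sl] = …' loop of Source B
def pvCatLoop (original_lower updated_lower : List Char) (missing_skills : List String) : PySem.Dict (List Char) String :=
  missing_skills.foldl
    (fun d skill =>
      let sl := PySem.Chars.lower skill.toList
      if d.contains sl then d
      else d.insert sl
        (if !(PySem.Chars.isIn sl updated_lower) then "not_added"
         else if PySem.Chars.isIn sl original_lower then "already_present"
         else "added"))
    PySem.Dict.empty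

def verify_keywords_added_alt (original_text : String) (updated_text : String) (missing_skills : List String) : List (String × List String) :=
  let original_lower := PySem.Chars.lower original_text.toList
  let updated_lower := PySem.Chars.lower updated_text.toList
  let category := pvCatLoop original_lower updated_lower missing_skills
  ["added", "already_present", "not_added"].map
    (fun label => (label, missing_skills.filter
      (fun s => category.getD (PySem.Chars.lower s.toList) "" == label)))

-- ===== PRECONDITION & SPEC =====
def Spec_verify_keywords_added (original_text : String) (updated_text : String) (missing_skills : List String) (out : List (String × List String)) : Prop := out = verify_keywords_added_alt original_text updated_text missing_skills
instance (original_text : String) (updated_text : String) (missing_skills : List String) (out : List (String × List String)) : Decidable (Spec_verify_keywords_added original_text updated_text missing_skills out) := by unfold Spec_verify_keywords_added; infer_instance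

-- ===== CLAIM (what is proved, stated in full; the proofs are below) =====
def Claim_equal_verify_keywords_added : Prop := ∀ (original_text : String) (updated_text : String) (missing_skills : List String), Dom_verify_keywords_added original_text updated_text missing_skills → Spec_verify_keywords_added original_text updated_text missing_skills (verify_keywords_added original_text updated_text missing_skills)

-- ===== LEMMAS AND PROOFS =====

-- the category of a lowered skill (proof-side characterisation of both programs)
def pvCat (ol ul sl : List Char) : String :=
  if !(PySem.Chars.isIn sl ul) then "not_added"
  else if PySem.Chars.isIn sl ol then "already_present"
  else "added"

-- A's fold accumulates exactly the three category filters
lemma pvFoldA (ol ul : List Char) (skills : List String) (a p n : List String) :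
    skills.foldl
      (fun (acc : List String × List String × List String) skill =>
        let skill_lower := PySem.Chars.lower skill.toList
        let was_present := PySem.Chars.isIn skill_lower ol
        let is_present := PySem.Chars.isIn skill_lower ul
        if is_present && !was_present then (acc.1 ++ [skill], acc.2.1, acc.2.2)
        else if is_present && was_present then (acc.1, acc.2.1 ++ [skill], acc.2.2)
        else (acc.1, acc.2.1, acc.2.2 ++ [skill]))
      (a, p, n)
    = (a ++ skills.filter (fun s => pvCat ol ul (PySem.Chars.lower s.toList) == "added"),
       p ++ skills.filter (fun s => pvCat ol ul (PySem.Chars.lower s.toList) == "already_present"),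
       n ++ skills.filter (fun s => pvCat ol ul (PySem.Chars.lower s.toList) == "not_added")) := by
  induction skills generalizing a p n with
  | nil => simp
  | cons s rest ih =>
    simp only [List.foldl_cons, List.filter_cons]
    rcases hu : PySem.Chars.isIn (PySem.Chars.lower s.toList) ul with _ | _ <;>
      rcases ho : PySem.Chars.isIn (PySem.Chars.lower s.toList) ol with _ | _ <;>
      simp only [hu, ho, Bool.not_true, Bool.not_false, Bool.and_true, Bool.and_false,
        Bool.false_eq_true, if_true, if_false] <;>
      rw [ih] <;>
      simp [pvCat, hu, ho]

-- the dict built by pvCatLoop from any start maps every processed lowered skill to its category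
lemma pvCatLoop_aux (ol ul : List Char) (skills : List String)
    (d : PySem.Dict (List Char) String) (k : List Char)
    (hd : d.contains k = true → d.getD k "" = pvCat ol ul k)
    (hk : d.contains k = true ∨ ∃ s ∈ skills, PySem.Chars.lower s.toList = k) :
    (skills.foldl
      (fun d skill =>
        let sl := PySem.Chars.lower skill.toList
        if d.contains sl then d
        else d.insert sl
          (if !(PySem.Chars.isIn sl ul) then "not_added"
           else if PySem.Chars.isIn sl ol then "already_present"
           else "added"))
      d).getD k "" = pvCat ol ul k := by
  induction skills generalizing d with
  | nil =>
    rcases hk with hk | ⟨s, hs, _⟩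
    · exact hd hk
    · simp at hs
  | cons s rest ih =>
    simp only [List.foldl_cons]
    by_cases hc : d.contains (PySem.Chars.lower s.toList) = true
    · simp only [hc, if_true]
      apply ih d hd
      rcases hk with hk | ⟨t, ht, hkt⟩
      · exact Or.inl hk
      · rcases List.mem_cons.mp ht with rfl | ht'
        · exact Or.inl (hkt ▸ hc)
        · exact Or.inr ⟨t, ht', hkt⟩
    · simp only [Bool.not_eq_true] at hc
      simp only [hc, Bool.false_eq_true, if_false]
      set sl := PySem.Chars.lower s.toList with hsl
      apply ih
      · intro hck
        rw [PySem.Dict.getD_insert]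
        by_cases hksl : k = sl
        · rw [if_pos hksl, hksl]; rfl
        · rw [if_neg hksl]
          rw [PySem.Dict.contains_insert] at hck
          rcases Bool.or_eq_true_iff.mp hck with h | h
          · exact absurd (eq_of_beq h) hksl
          · exact hd h

      · rcases hk with hk | ⟨t, ht, hkt⟩
        · left
          rw [PySem.Dict.contains_insert]
          simp [hk]
        · rcases List.mem_cons.mp ht with rfl | ht'
          · left
            rw [← hkt, hsl]
            exact PySem.Dict.contains_insert_self _ _ _
          · exact Or.inr ⟨t, ht', hkt⟩

lemma pvCatLoop_getD (ol ul : List Char) (skills : List String) (s : String) (hs : s ∈ skills) :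
    (pvCatLoop ol ul skills).getD (PySem.Chars.lower s.toList) "" =
      pvCat ol ul (PySem.Chars.lower s.toList) := by
  unfold pvCatLoop
  exact pvCatLoop_aux ol ul skills PySem.Dict.empty _
    (by simp) (Or.inr ⟨s, hs, rfl⟩)

-- ===== VERDICT (by name: the statement is the Claim_ definition above) =====
theorem verify_keywords_added_spec : Claim_equal_verify_keywords_added := by
  intro o u skills _
  unfold Spec_verify_keywords_added verify_keywords_added verify_keywords_added_alt
  simp only [List.map_cons, List.map_nil]
  rw [pvFoldA]
  simp only [List.nil_append]
  congr 1 <;> [skip; congr 1] <;> [skip; skip; congr 1]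
  all_goals
    first
    | rfl
    | (congr 1
       apply List.filter_congr
       intro s hs
       rw [pvCatLoop_getD _ _ _ _ hs])
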